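-- pv_equiv track=rewrite | github.com/flavoursam/MIT-6.0001 | PS3/utils.py | is_valid_word_without_wildcard
-- ===== SOURCE A (Python) =====
-- def is_valid_word_without_wildcard(word, hand, word_list):
--     in_wordlist = check_wordlist(word, word_list)
--     result = copy_map(hand)
--     for char in word:
--         if result.get(char, 0) > 0:
--             result[char] -= 1
--         else:
--             return False
--     if not in_wordlist:
--         return False
--     return True
--
-- def copy_map(map):
--     result = {}
--     for k, v in map.items():
--         result[k] = v
--     return result
--
-- def check_wordlist(word, word_list):
--     if word in word_list:
--         return True
--     return False
-- ===== SOURCE B (Python) =====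
-- def is_valid_word_without_wildcard(word, hand, word_list):
--     letters = sorted(word)
--     n = len(letters)
--     i = 0
--     while i < n:
--         j = i
--         while j < n and letters[j] == letters[i]:
--             j += 1
--         if hand.get(letters[i], 0) < j - i:
--             return False
--         i = j
--     return word in word_list
-- ===== Notes on version B (the rewrite author's own statement) =====
-- stated objective: alternative
-- what changed: B sorts the word's letters and scans the sorted list run by run, comparing each run length against the hand once, instead of copying the hand dict and decrementing a mutable copy per character.
import Mathlib
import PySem

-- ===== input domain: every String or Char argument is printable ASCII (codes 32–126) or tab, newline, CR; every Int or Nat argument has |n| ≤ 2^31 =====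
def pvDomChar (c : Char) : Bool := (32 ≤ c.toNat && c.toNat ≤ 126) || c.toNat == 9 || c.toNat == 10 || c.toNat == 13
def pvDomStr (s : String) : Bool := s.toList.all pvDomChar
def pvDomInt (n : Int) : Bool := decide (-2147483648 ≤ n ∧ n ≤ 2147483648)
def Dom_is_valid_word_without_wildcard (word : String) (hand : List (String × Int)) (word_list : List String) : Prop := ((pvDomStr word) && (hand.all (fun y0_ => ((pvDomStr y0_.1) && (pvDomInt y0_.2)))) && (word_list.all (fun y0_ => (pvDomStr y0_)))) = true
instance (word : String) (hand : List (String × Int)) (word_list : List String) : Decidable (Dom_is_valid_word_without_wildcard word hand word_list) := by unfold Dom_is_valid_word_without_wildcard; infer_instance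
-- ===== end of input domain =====

-- B sorts the word's letters and scans the sorted list run by run, comparing each run
-- length against the hand once, instead of copying the hand and decrementing per character.

-- ===== PORT A =====
def pv_check_wordlist (word : String) (word_list : List String) : Bool :=
  if word ∈ word_list then true else false

def pv_copy_map (m : List (String × Int)) : PySem.Dict String Int :=
  m.foldl (fun d p => d.insert p.1 p.2) PySem.Dict.empty

def pv_loopA : List Char → PySem.Dict String Int → Option (PySem.Dict String Int)
  | [], d => some d
  | c :: cs, d =>
    if d.getD (String.ofList [c]) 0 > 0 then
      pv_loopA cs (d.modify (String.ofList [c]) 0 (fun v => v - 1))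
    else none

def is_valid_word_without_wildcard (word : String) (hand : List (String × Int)) (word_list : List String) : Bool :=
  let in_wordlist := pv_check_wordlist word word_list
  match pv_loopA word.toList (pv_copy_map hand) with
  | none => false
  | some _ => if !in_wordlist then false else true

-- ===== PORT B =====
-- outer while loop over the sorted letters; the inner `while letters[j] == letters[i]`
-- run-scan is transcribed as takeWhile/dropWhile at the current position
def pv_runsB (hand : PySem.Dict String Int) : List Char → Bool
  | [] => true
  | c :: cs =>
    if hand.getD (String.ofList [c]) 0 < ((cs.takeWhile (· == c)).length : Int) + 1 then
      false
    else
      pv_runsB hand (cs.dropWhile (· == c))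
termination_by l => l.length
decreasing_by
  simp only [List.length_cons]
  exact Nat.lt_succ_of_le (List.length_dropWhile_le _ _)

def is_valid_word_without_wildcard_alt (word : String) (hand : List (String × Int)) (word_list : List String) : Bool :=
  let letters := PySem.List.sorted word.toList (fun c => c) false
  if pv_runsB (PySem.Dict.mk hand) letters then word_list.contains word else false

-- ===== PRECONDITION & SPEC =====
-- Pre_ excludes association lists for `hand` with duplicate keys: a Python dict cannot
-- contain duplicate keys, so such lists represent no input the Python function can receive.
def Pre_is_valid_word_without_wildcard (word : String) (hand : List (String × Int)) (word_list : List String) : Prop :=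
  (hand.map Prod.fst).Nodup
instance (word : String) (hand : List (String × Int)) (word_list : List String) : Decidable (Pre_is_valid_word_without_wildcard word hand word_list) := by unfold Pre_is_valid_word_without_wildcard; infer_instance
def pvWitness_is_valid_word_without_wildcard : String × (List (String × Int)) × List String :=
  ("ab", [("a", 1), ("b", 2)], ["ab"])

def Spec_is_valid_word_without_wildcard (word : String) (hand : List (String × Int)) (word_list : List String) (out : Bool) : Prop := out = is_valid_word_without_wildcard_alt word hand word_list
instance (word : String) (hand : List (String × Int)) (word_list : List String) (out : Bool) : Decidable (Spec_is_valid_word_without_wildcard word hand word_list out) := by unfold Spec_is_valid_word_without_wildcard; infer_instance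

-- ===== CLAIM (what is proved, stated in full; the proofs are below) =====
def Claim_equal_is_valid_word_without_wildcard : Prop := ∀ (word : String) (hand : List (String × Int)) (word_list : List String), Dom_is_valid_word_without_wildcard word hand word_list → Pre_is_valid_word_without_wildcard word hand word_list → Spec_is_valid_word_without_wildcard word hand word_list (is_valid_word_without_wildcard word hand word_list)

-- ===== LEMMAS AND PROOFS =====
lemma key_inj {c c' : Char} (h : String.ofList [c] = String.ofList [c']) : c = c' := by
  have := congrArg String.toList h
  simpa using this

lemma copy_map_eq (hand : List (String × Int)) (h : (hand.map Prod.fst).Nodup) :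
    pv_copy_map hand = PySem.Dict.mk hand := by
  apply PySem.Dict.ext
  have := PySem.Dict.items_foldl_insert_fresh (l := hand) (k := Prod.fst) (v := Prod.snd)
      (d := PySem.Dict.empty) (by simp) h
  simpa [pv_copy_map] using this

lemma loopA_isSome : ∀ (cs : List Char) (d : PySem.Dict String Int),
    (pv_loopA cs d).isSome = true ↔ ∀ c ∈ cs, ((cs.count c : Int) ≤ d.getD (String.ofList [c]) 0)
  | [], d => by simp [pv_loopA]
  | c :: cs, d => by
    rw [pv_loopA]
    by_cases hg : d.getD (String.ofList [c]) 0 > 0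
    · rw [if_pos hg, loopA_isSome cs]
      constructor
      · intro h x hx
        rcases eq_or_ne x c with rfl | hne
        · have : (cs.count x : Int) ≤ (d.modify (String.ofList [x]) 0 (fun v => v - 1)).getD (String.ofList [x]) 0 := by
            by_cases hxc : x ∈ cs
            · exact h x hxc
            · simp [List.count_eq_zero_of_not_mem hxc, PySem.Dict.getD_modify_self]
              omega
          rw [PySem.Dict.getD_modify_self] at this
          simp [List.count_cons_self]
          omega
        · have hx' : x ∈ cs := by cases hx with
            | head => exact absurd rfl hne
            | tail _ h => exact h
          have := h x hx'
          rw [PySem.Dict.getD_modify, if_neg (by intro he; exact hne (key_inj he))] at this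
          simpa [List.count_cons, hne, Ne.symm hne] using this
      · intro h x hx
        rcases eq_or_ne x c with rfl | hne
        · rw [PySem.Dict.getD_modify_self]
          have := h x (by simp)
          simp [List.count_cons_self] at this
          omega
        · rw [PySem.Dict.getD_modify, if_neg (by intro he; exact hne (key_inj he))]
          have := h x (by simp [hx])
          simpa [List.count_cons, hne, Ne.symm hne] using this
    · rw [if_neg hg]
      constructor
      · intro h; simp at h
      · intro h
        exfalso
        have := h c (by simp)
        simp [List.count_cons_self] at this
        have hc : (0:Int) ≤ cs.count c := by positivity
        omega

-- the run scan of B accepts a sorted list exactly when every letter's multiplicity fits the hand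
lemma runsB_iff_aux (d : PySem.Dict String Int) :
    ∀ (n : Nat) (l : List Char), l.length ≤ n → l.Pairwise (· ≤ ·) →
      (pv_runsB d l = true ↔ ∀ c ∈ l, ((l.count c : Int) ≤ d.getD (String.ofList [c]) 0)) := by
  intro n
  induction n with
  | zero =>
    intro l hl _
    have : l = [] := List.eq_nil_of_length_eq_zero (Nat.le_zero.mp hl)
    subst this
    simp [pv_runsB]
  | succ n ih =>
    intro l hl hp
    cases l with
    | nil => simp [pv_runsB]
    | cons c cs =>
      have hle : ∀ x ∈ cs, c ≤ x := (List.pairwise_cons.mp hp).1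
      have hcs : cs.Pairwise (· ≤ ·) := (List.pairwise_cons.mp hp).2
      have hr_pair : (cs.dropWhile (· == c)).Pairwise (· ≤ ·) :=
        List.Pairwise.sublist (List.dropWhile_sublist _) hcs
      have ht_all : ∀ x ∈ cs.takeWhile (· == c), x = c := by
        intro x hx
        simpa using List.mem_takeWhile_imp hx
      have hsplit : cs.takeWhile (· == c) ++ cs.dropWhile (· == c) = cs :=
        List.takeWhile_append_dropWhile
      have hgt : ∀ x ∈ cs.dropWhile (· == c), c < x := by
        intro x hx
        cases hdw : cs.dropWhile (· == c) with
        | nil => rw [hdw] at hx; cases hx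
        | cons b rb =>
          have hbne : ¬ (b == c) = true := by
            have := List.head?_dropWhile_not (· == c) cs
            rw [hdw] at this; simpa using this
          have hbc : b ≠ c := by simpa using hbne
          have hb_mem : b ∈ cs := (List.dropWhile_sublist _).mem (by rw [hdw]; simp)
          have hcb : c < b := lt_of_le_of_ne (hle b hb_mem) (Ne.symm hbc)
          rw [hdw] at hx hr_pair
          rcases List.mem_cons.mp hx with rfl | hx'
          · exact hcb
          · exact lt_of_lt_of_le hcb ((List.pairwise_cons.mp hr_pair).1 x hx')
      have hc_not_r : c ∉ cs.dropWhile (· == c) := fun h => lt_irrefl c (hgt c h)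
      have hcs_count : ∀ x : Char, cs.count x
          = (cs.takeWhile (· == c)).count x + (cs.dropWhile (· == c)).count x := by
        intro x
        conv_lhs => rw [← hsplit]
        rw [List.count_append]
      have hcount_c : (c :: cs).count c = (cs.takeWhile (· == c)).length + 1 := by
        rw [List.count_cons_self, hcs_count c,
          List.count_eq_zero_of_not_mem hc_not_r,
          List.count_eq_length.mpr (fun x hx => ((ht_all x hx) ▸ rfl : c = x))]
      have hcount_r : ∀ x ∈ cs.dropWhile (· == c),
          (c :: cs).count x = (cs.dropWhile (· == c)).count x := by
        intro x hx
        have hxc : x ≠ c := fun he => hc_not_r (he ▸ hx)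
        rw [List.count_cons, hcs_count x,
          List.count_eq_zero_of_not_mem (fun hxt => hxc (ht_all x hxt))]
        simp [Ne.symm hxc]
      have hlen : (cs.dropWhile (· == c)).length ≤ n := by
        have h1 := List.length_dropWhile_le (· == c) cs
        have h2 : cs.length + 1 ≤ n + 1 := by simpa using hl
        omega
      rw [pv_runsB]
      by_cases hif : d.getD (String.ofList [c]) 0 < ((cs.takeWhile (· == c)).length : Int) + 1
      · rw [if_pos hif]
        constructor
        · intro h; simp at h
        · intro hall
          exfalso
          have := hall c (by simp)
          rw [hcount_c] at this
          push_cast at this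
          omega
      · rw [if_neg hif, ih _ hlen hr_pair]
        constructor
        · intro h x hx
          rcases eq_or_ne x c with rfl | hne
          · rw [hcount_c]; push_cast; omega
          · have hx' : x ∈ cs := by
              cases hx with
              | head => exact absurd rfl hne
              | tail _ h => exact h
            have hxr : x ∈ cs.dropWhile (· == c) := by
              rcases List.mem_append.mp (by rw [hsplit]; exact hx' :
                  x ∈ cs.takeWhile (· == c) ++ cs.dropWhile (· == c)) with ht | hr
              · exact absurd (ht_all x ht) hne
              · exact hr
            rw [hcount_r x hxr]
            exact h x hxr
        · intro h x hx
          have hxm : x ∈ c :: cs := List.mem_cons_of_mem c ((List.dropWhile_sublist _).mem hx)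
          rw [← hcount_r x hx]
          exact h x hxm

lemma runsB_iff (d : PySem.Dict String Int) (l : List Char) (hp : l.Pairwise (· ≤ ·)) :
    pv_runsB d l = true ↔ ∀ c ∈ l, ((l.count c : Int) ≤ d.getD (String.ofList [c]) 0) :=
  runsB_iff_aux d l.length l le_rfl hp

theorem portA_eq_portB (word : String) (hand : List (String × Int)) (word_list : List String)
    (hpre : (hand.map Prod.fst).Nodup) :
    is_valid_word_without_wildcard word hand word_list
      = is_valid_word_without_wildcard_alt word hand word_list := by
  unfold is_valid_word_without_wildcard is_valid_word_without_wildcard_alt pv_check_wordlist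
  rw [copy_map_eq hand hpre]
  dsimp only
  have hperm : (PySem.List.sorted word.toList (fun c => c) false).Perm word.toList :=
    PySem.List.sorted_perm _ _ _
  have hpair : (PySem.List.sorted word.toList (fun c => c) false).Pairwise (· ≤ ·) := by
    simpa using PySem.List.sorted_pairwise (xs := word.toList) (key := fun c => c)
  have hB := runsB_iff (PySem.Dict.mk hand) _ hpair
  have hA := loopA_isSome word.toList (PySem.Dict.mk hand)
  have hsame : (∀ c ∈ PySem.List.sorted word.toList (fun c => c) false,
        (((PySem.List.sorted word.toList (fun c => c) false).count c : Int) ≤ (PySem.Dict.mk hand).getD (String.ofList [c]) 0))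
      ↔ (∀ c ∈ word.toList, ((word.toList.count c : Int) ≤ (PySem.Dict.mk hand).getD (String.ofList [c]) 0)) := by
    constructor
    · intro h x hx
      have := h x (hperm.mem_iff.mpr hx)
      rwa [hperm.count_eq] at this
    · intro h x hx
      rw [hperm.count_eq]
      exact h x (hperm.mem_iff.mp hx)
  cases hAo : pv_loopA word.toList (PySem.Dict.mk hand) with
  | none =>
      have hfail : ¬ (∀ c ∈ word.toList, ((word.toList.count c : Int) ≤ (PySem.Dict.mk hand).getD (String.ofList [c]) 0)) := by
        rw [← hA, hAo]; simp
      have : pv_runsB (PySem.Dict.mk hand) (PySem.List.sorted word.toList (fun c => c) false) = false := by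
        cases hb : pv_runsB (PySem.Dict.mk hand) (PySem.List.sorted word.toList (fun c => c) false)
        · rfl
        · exact (hfail (hsame.mp (hB.mp hb))).elim
      rw [this]
      simp
  | some dd =>
      have hok := hA.mp (by rw [hAo]; rfl)
      have : pv_runsB (PySem.Dict.mk hand) (PySem.List.sorted word.toList (fun c => c) false) = true :=
        hB.mpr (hsame.mpr hok)
      rw [this, if_pos rfl]
      by_cases hw : word ∈ word_list
      · simp [hw]
      · simp [hw]

-- ===== VERDICT (by name: the statement is the Claim_ definition above) =====
theorem is_valid_word_without_wildcard_spec : Claim_equal_is_valid_word_without_wildcard := by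
  intro word hand word_list _ hpre
  unfold Spec_is_valid_word_without_wildcard
  exact portA_eq_portB word hand word_list hpre
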